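-- pv_equiv track=rewrite | github.com/Zamarripa232/BoringStuffAutomated | Chapters/4/coinFlips.py | checkStreak
-- ===== SOURCE A (Python) =====
-- def checkStreak(headsTails, flipList):
--     """Returns 1 if a streak is found"""
--     streak = 0
--     for i in flipList:
--         if i == headsTails:
--             streak += 1
--             if streak == 6:
--                 return 1
--         else:
--             streak = 0
--     return 0
-- ===== SOURCE B (Python) =====
-- def checkStreak(headsTails, flipList):
--     """Returns 1 if a streak is found"""
--     i = 0
--     n = len(flipList)
--     while i < n:
--         j = i
--         while j < n and flipList[j] == flipList[i]:
--             j += 1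
--         if flipList[i] == headsTails and j - i >= 6:
--             return 1
--         i = j
--     return 0
-- ===== Notes on version B (the rewrite author's own statement) =====
-- stated objective: alternative
-- what changed: B splits the list into maximal runs of equal consecutive elements (two-pointer run scan) and returns 1 iff some run of headsTails has length >= 6, instead of A's incremental streak counter with reset.
import Mathlib
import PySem

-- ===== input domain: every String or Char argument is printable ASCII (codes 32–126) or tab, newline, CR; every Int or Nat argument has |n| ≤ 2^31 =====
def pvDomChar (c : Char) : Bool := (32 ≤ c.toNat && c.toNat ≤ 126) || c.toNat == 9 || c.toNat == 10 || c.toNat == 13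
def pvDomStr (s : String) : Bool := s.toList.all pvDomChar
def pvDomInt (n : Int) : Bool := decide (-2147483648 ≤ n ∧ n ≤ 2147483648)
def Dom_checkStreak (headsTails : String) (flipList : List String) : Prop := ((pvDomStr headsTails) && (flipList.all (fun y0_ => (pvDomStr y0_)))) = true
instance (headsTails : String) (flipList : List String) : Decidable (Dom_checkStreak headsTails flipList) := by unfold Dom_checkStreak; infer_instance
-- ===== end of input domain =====

-- B replaces A's incremental streak counter by a scan over maximal runs of equal
-- consecutive elements; same O(n) cost, alternative structure.

-- ===== PORT A =====
-- A's for-loop with its `streak` accumulator, early return on streak == 6.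
def checkStreakLoop (headsTails : String) : List String → Int → Int
  | [], _ => 0
  | i :: rest, streak =>
    if i = headsTails then
      if streak + 1 = 6 then 1 else checkStreakLoop headsTails rest (streak + 1)
    else checkStreakLoop headsTails rest 0

def checkStreak (headsTails : String) (flipList : List String) : Int :=
  checkStreakLoop headsTails flipList 0

-- ===== PORT B =====
-- B's outer while-loop: take the maximal run starting at the current element
-- (inner while-loop = takeWhile/dropWhile), test it, continue after the run.
def checkStreakRuns (headsTails : String) : List String → Bool
  | [] => false
  | x :: xs =>
    if x = headsTails ∧ 6 ≤ (xs.takeWhile (fun y => y = x)).length + 1 then true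
    else checkStreakRuns headsTails (xs.dropWhile (fun y => y = x))
termination_by l => l.length
decreasing_by
  exact Nat.lt_succ_of_le (List.length_dropWhile_le _ _)

def checkStreak_alt (headsTails : String) (flipList : List String) : Int :=
  if checkStreakRuns headsTails flipList then 1 else 0

-- ===== PRECONDITION & SPEC =====
def Spec_checkStreak (headsTails : String) (flipList : List String) (out : Int) : Prop := out = checkStreak_alt headsTails flipList
instance (headsTails : String) (flipList : List String) (out : Int) : Decidable (Spec_checkStreak headsTails flipList out) := by unfold Spec_checkStreak; infer_instance

-- ===== CLAIM (what is proved, stated in full; the proofs are below) =====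
def Claim_equal_checkStreak : Prop := ∀ (headsTails : String) (flipList : List String), Dom_checkStreak headsTails flipList → Spec_checkStreak headsTails flipList (checkStreak headsTails flipList)

-- ===== LEMMAS AND PROOFS =====

-- A's loop over a block of elements all equal to headsTails.
theorem loop_run (h : String) : ∀ (l : List String) (rest : List String) (s : ℕ),
    (∀ y ∈ l, y = h) → s < 6 →
    checkStreakLoop h (l ++ rest) (s : Int) =
      if 6 ≤ s + l.length then 1 else checkStreakLoop h rest ((s + l.length : ℕ) : Int) := by
  intro l
  induction l with
  | nil => intro rest s _ hs; simp [Nat.not_le.mpr hs]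
  | cons y t ih =>
    intro rest s hall hs
    have hy : y = h := hall y (by simp)
    simp only [List.cons_append, checkStreakLoop, if_pos hy]
    by_cases h6 : (s : Int) + 1 = 6
    · have h5 : s = 5 := by omega
      subst h5
      rw [if_pos h6, if_pos (by simp; omega)]
    · have hs1 : s + 1 < 6 := by omega
      have hcast : (s : Int) + 1 = ((s + 1 : ℕ) : Int) := by push_cast; ring
      have harith : s + 1 + t.length = s + (y :: t).length := by simp; omega
      rw [if_neg h6, hcast, ih rest (s + 1) (fun z hz => hall z (by simp [hz])) hs1, harith]

-- A's loop ignores a block of elements all different from headsTails.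
theorem loop_skip (h : String) : ∀ (l : List String) (rest : List String),
    (∀ y ∈ l, y ≠ h) →
    checkStreakLoop h (l ++ rest) 0 = checkStreakLoop h rest 0 := by
  intro l
  induction l with
  | nil => intro rest _; simp
  | cons y t ih =>
    intro rest hall
    have hy : ¬ y = h := hall y (by simp)
    simp only [List.cons_append, checkStreakLoop, if_neg hy]
    exact ih rest (fun y hy => hall y (by simp [hy]))

-- The streak value is irrelevant when the next element breaks the run (or the list ends).
theorem loop_reset (h : String) (rest : List String) (s : Int)
    (hr : rest = [] ∨ ∃ y t, rest = y :: t ∧ y ≠ h) :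
    checkStreakLoop h rest s = checkStreakLoop h rest 0 := by
  rcases hr with hr | ⟨y, t, hr, hy⟩
  · subst hr; rfl
  · subst hr; simp [checkStreakLoop, if_neg hy]

theorem dropWhile_shape (p : String → Bool) : ∀ (l : List String),
    l.dropWhile p = [] ∨ ∃ y t, l.dropWhile p = y :: t ∧ p y = false := by
  intro l
  induction l with
  | nil => simp
  | cons x xs ih =>
    by_cases hx : p x
    · simpa [List.dropWhile, hx] using ih
    · right; refine ⟨x, xs, ?_, ?_⟩
      · simp [List.dropWhile, hx]
      · simp [hx]

theorem main_equiv (h : String) : ∀ (fl : List String),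
    checkStreakLoop h fl 0 = (if checkStreakRuns h fl then 1 else 0) := by
  intro fl
  induction fl using checkStreakRuns.induct h with
  | case1 => simp [checkStreakLoop, checkStreakRuns]
  | case2 x xs hcond =>
    -- run case: condition holds, both sides return 1
    rw [checkStreakRuns, if_pos hcond]
    obtain ⟨hx, hlen⟩ := hcond
    rw [if_pos rfl]
    have hsplit : x :: xs = (x :: xs.takeWhile (fun y => y = x)) ++ xs.dropWhile (fun y => y = x) := by
      simp [List.takeWhile_append_dropWhile]
    rw [hsplit]
    have hall : ∀ y ∈ x :: xs.takeWhile (fun y => y = x), y = h := by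
      intro y hy
      rcases List.mem_cons.mp hy with hy | hy
      · rw [hy, hx]
      · have := List.mem_takeWhile_imp hy
        simp at this; rw [this, hx]
    have := loop_run h (x :: xs.takeWhile (fun y => y = x)) (xs.dropWhile (fun y => y = x)) 0 hall (by omega)
    simp only [Nat.zero_add, List.length_cons] at this
    rw [show ((0 : ℕ) : Int) = 0 from rfl] at this
    rw [this, if_pos (by simpa using hlen)]
  | case3 x xs hcond ih =>
    rw [checkStreakRuns]
    simp only [if_neg hcond]
    rw [← ih]
    have hsplit : x :: xs = (x :: xs.takeWhile (fun y => y = x)) ++ xs.dropWhile (fun y => y = x) := by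
      simp [List.takeWhile_append_dropWhile]
    by_cases hx : x = h
    · -- run of headsTails but shorter than 6
      have hlen : ¬ 6 ≤ (xs.takeWhile (fun y => y = x)).length + 1 := fun hl => hcond ⟨hx, hl⟩
      have hall : ∀ y ∈ x :: xs.takeWhile (fun y => y = x), y = h := by
        intro y hy
        rcases List.mem_cons.mp hy with hy | hy
        · rw [hy, hx]
        · have := List.mem_takeWhile_imp hy
          simp at this; rw [this, hx]
      rw [hsplit]
      have := loop_run h (x :: xs.takeWhile (fun y => y = x)) (xs.dropWhile (fun y => y = x)) 0 hall (by omega)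
      simp only [Nat.zero_add, List.length_cons] at this
      rw [show ((0 : ℕ) : Int) = 0 from rfl] at this
      rw [this, if_neg (by simpa using hlen)]
      apply loop_reset
      have := dropWhile_shape (fun y => decide (y = x)) xs
      rcases this with hd | ⟨y, t, hd, hy⟩
      · left; exact hd
      · right; refine ⟨y, t, hd, ?_⟩
        simp at hy
        rw [← hx]; exact hy
    · -- run of non-headsTails elements: skipped by both
      have hall : ∀ y ∈ x :: xs.takeWhile (fun y => y = x), y ≠ h := by
        intro y hy
        rcases List.mem_cons.mp hy with hy | hy
        · rw [hy]; exact hx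
        · have := List.mem_takeWhile_imp hy
          simp at this; rw [this]; exact hx
      rw [hsplit]
      exact loop_skip h _ _ hall

-- ===== VERDICT (by name: the statement is the Claim_ definition above) =====
theorem checkStreak_spec : Claim_equal_checkStreak := by
  intro h fl _
  show checkStreak h fl = checkStreak_alt h fl
  exact main_equiv h fl
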